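-- pv_equiv track=rewrite | github.com/adityas181/testing_repoo1 | agentcore/src/backend/base/agentcore/graph_langgraph/utils.py | filter_vertices_from_vertex
-- ===== SOURCE A (Python) =====
-- from collections import defaultdict, deque
--
-- def filter_vertices_from_vertex(
--     vertices_ids: list[str],
--     start_vertex_id: str,
--     successor_map: dict[str, list[str]],
-- ) -> set[str]:
--     """Filter vertices to only include those reachable from the start vertex.
--
--     This function performs a breadth-first traversal forward from the start vertex,
--     collecting all vertices that are successors (directly or indirectly) of the start vertex.
--     This is used for "Run From Specific Component" functionality.
--
--     Args:
--         vertices_ids: List of all vertex IDs in the graph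
--         start_vertex_id: ID of the vertex to start from (will be included in result)
--         successor_map: Map of vertex ID -> list of successor vertex IDs
--
--     Returns:
--         Set of vertex IDs reachable from the start vertex (including the start vertex itself)
--
--     Example:
--         Given graph: A -> B -> C -> D
--         If start_vertex_id = "B", returns {"B", "C", "D"}
--     """
--     vertices_set = set(vertices_ids)
--
--     # If start vertex doesn't exist, return empty
--     if start_vertex_id not in vertices_set:
--         return set()
--
--     # Start with the start vertex
--     filtered_vertices = {start_vertex_id}
--     queue = deque([start_vertex_id])
--
--     # Process vertices in breadth-first order going forward
--     while queue:
--         current_vertex = queue.popleft()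
--         successors = successor_map.get(current_vertex, [])
--
--         for successor in successors:
--             if successor in vertices_set and successor not in filtered_vertices:
--                 filtered_vertices.add(successor)
--                 queue.append(successor)
--
--     return filtered_vertices
-- ===== SOURCE B (Python) =====
-- def filter_vertices_from_vertex(
--     vertices_ids: list[str],
--     start_vertex_id: str,
--     successor_map: dict[str, list[str]],
-- ) -> set[str]:
--     """Fixpoint saturation: repeatedly sweep every edge of successor_map, adding
--     targets whose source is already reachable, until a full sweep adds nothing.
--     No queue/frontier/worklist is maintained; the result is the least set
--     containing the start vertex and closed under allowed successor edges,
--     i.e. exactly the reachable set."""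
--     vertices_set = set(vertices_ids)
--     if start_vertex_id not in vertices_set:
--         return set()
--     reachable = {start_vertex_id}
--     changed = True
--     while changed:
--         changed = False
--         for source, successors in successor_map.items():
--             if source in reachable:
--                 for successor in successors:
--                     if successor in vertices_set and successor not in reachable:
--                         reachable.add(successor)
--                         changed = True
--     return reachable
-- ===== Notes on version B (the rewrite author's own statement) =====
-- stated objective: alternative
-- what changed: Replaced BFS with a worklist-free fixpoint saturation: repeated full sweeps over all edges of successor_map, adding targets of already-reachable sources, until a sweep changes nothing; no queue/frontier is kept, the result is the same least closed set.
import Mathlib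
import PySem

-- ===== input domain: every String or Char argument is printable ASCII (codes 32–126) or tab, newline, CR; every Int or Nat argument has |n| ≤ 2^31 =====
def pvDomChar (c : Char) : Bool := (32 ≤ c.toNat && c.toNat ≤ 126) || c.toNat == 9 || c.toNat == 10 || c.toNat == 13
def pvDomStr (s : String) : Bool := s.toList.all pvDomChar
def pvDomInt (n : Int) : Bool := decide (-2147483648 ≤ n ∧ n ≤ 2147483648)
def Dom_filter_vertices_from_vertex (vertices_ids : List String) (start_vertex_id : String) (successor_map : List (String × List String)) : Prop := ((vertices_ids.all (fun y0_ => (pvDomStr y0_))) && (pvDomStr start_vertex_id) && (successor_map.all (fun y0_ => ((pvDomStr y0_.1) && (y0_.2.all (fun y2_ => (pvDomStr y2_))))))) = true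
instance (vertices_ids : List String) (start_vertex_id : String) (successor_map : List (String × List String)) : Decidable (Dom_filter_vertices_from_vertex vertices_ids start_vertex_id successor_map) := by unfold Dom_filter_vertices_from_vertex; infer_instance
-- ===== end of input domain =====

-- B replaces A's queue-based BFS by a worklist-free fixpoint saturation (repeated full sweeps
-- over successor_map's edges until a sweep adds nothing); same reachable set.
-- Python returns an unordered set (its iteration order is not modelled); both ports return
-- the set's elements sorted, the canonical list representation of the unordered set.

-- ===== PORT A =====

-- inner step of A's BFS: 'if successor in vertices_set and successor not in filtered:
-- filtered.add(successor); queue.append(successor)'; state = (filtered, queue)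
def pvStep (vset : List String) (st : List String × List String) (s : String) : List String × List String :=
  if PySem.Set.contains vset s && !(PySem.Set.contains st.1 s) then (PySem.Set.add st.1 s, st.2 ++ [s]) else st

-- termination measure: number of vset elements not yet in filtered
def pvMissing (vset f : List String) : Nat := (vset.filter (fun x => !(PySem.Set.contains f x))).length

lemma pvMissing_add_lt (vset f : List String) (s : String)
    (hs : PySem.Set.contains vset s = true) (hf : PySem.Set.contains f s = false) :
    pvMissing vset (PySem.Set.add f s) < pvMissing vset f := by
  have hsf : s ∉ f := by simpa [PySem.Set.contains] using hf
  have hadd : PySem.Set.add f s = f ++ [s] := by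
    unfold PySem.Set.add; rw [hf]; simp
  unfold pvMissing
  rw [hadd]
  have hfil : vset.filter (fun x => !(PySem.Set.contains (f ++ [s]) x))
      = (vset.filter (fun x => !(PySem.Set.contains f x))).filter (fun x => !(x == s)) := by
    rw [List.filter_filter]
    apply List.filter_congr
    intro x _
    by_cases hx : x = s
    · subst hx; simp [PySem.Set.contains, hsf]
    · simp [PySem.Set.contains, hx]
  rw [hfil]
  apply List.length_filter_lt_length_iff_exists.mpr
  refine ⟨s, ?_, by simp⟩
  rw [List.mem_filter]
  exact ⟨by simpa [PySem.Set.contains] using hs, by simpa [PySem.Set.contains] using hsf⟩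

lemma pvStep_measure (vset succs : List String) : ∀ f q : List String,
    2 * pvMissing vset (succs.foldl (pvStep vset) (f, q)).1 + (succs.foldl (pvStep vset) (f, q)).2.length
      ≤ 2 * pvMissing vset f + q.length := by
  induction succs with
  | nil => intro f q; simp
  | cons s rest ih =>
    intro f q
    simp only [List.foldl_cons]
    by_cases h : (PySem.Set.contains vset s && !(PySem.Set.contains f s)) = true
    · have hstep : pvStep vset (f, q) s = (PySem.Set.add f s, q ++ [s]) := by
        unfold pvStep; rw [if_pos h]
      rw [hstep]
      simp only [Bool.and_eq_true, Bool.not_eq_true'] at h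
      have hih := ih (PySem.Set.add f s) (q ++ [s])
      have hlt := pvMissing_add_lt vset f s h.1 h.2
      simp only [List.length_append, List.length_cons, List.length_nil] at hih ⊢
      omega
    · have hstep : pvStep vset (f, q) s = (f, q) := by
        unfold pvStep; rw [if_neg h]
      rw [hstep]
      exact ih f q

def pvBfsA (vset : List String) (smap : List (String × List String)) :
    List String → List String → List String
  | filtered, [] => filtered
  | filtered, current :: rest =>
    let st := (PySem.Dict.getD (PySem.Dict.mk smap) current []).foldl (pvStep vset) (filtered, rest)
    pvBfsA vset smap st.1 st.2
termination_by f q => 2 * pvMissing vset f + q.length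
decreasing_by
  have := pvStep_measure vset (PySem.Dict.getD (PySem.Dict.mk smap) current []) filtered rest
  simp only [List.length_cons]
  omega

def filter_vertices_from_vertex (vertices_ids : List String) (start_vertex_id : String) (successor_map : List (String × List String)) : List String :=
  let vertices_set := PySem.Set.ofList vertices_ids
  if !(PySem.Set.contains vertices_set start_vertex_id) then []
  else PySem.List.sorted (pvBfsA vertices_set successor_map [start_vertex_id] [start_vertex_id]) (fun x => x)

-- ===== PORT B =====

-- inner step of B's sweep: 'if successor in vertices_set and successor not in reachable:
-- reachable.add(successor); changed = True'; state = (reachable, changed)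
def pvInner (vset : List String) (st : List String × Bool) (s : String) : List String × Bool :=
  if PySem.Set.contains vset s && !(PySem.Set.contains st.1 s) then (PySem.Set.add st.1 s, true) else st

-- one entry of the sweep: 'if source in reachable: for successor in successors: …'
def pvEntry (vset : List String) (st : List String × Bool) (p : String × List String) : List String × Bool :=
  if PySem.Set.contains st.1 p.1 then p.2.foldl (pvInner vset) st else st

-- one full sweep over successor_map.items() with changed reset to False
def pvPass (vset : List String) (smap : List (String × List String)) (st : List String × Bool) : List String × Bool :=
  smap.foldl (pvEntry vset) st

-- a fold of pvInner either leaves the state unchanged or strictly shrinks the measure and sets changed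
lemma pvInner_meas (vset : List String) (l : List String) : ∀ st : List String × Bool,
    l.foldl (pvInner vset) st = st ∨
      (pvMissing vset (l.foldl (pvInner vset) st).1 < pvMissing vset st.1 ∧ (l.foldl (pvInner vset) st).2 = true) := by
  induction l with
  | nil => intro st; exact Or.inl (by simp)
  | cons s rest ih =>
    intro st
    simp only [List.foldl_cons]
    by_cases hc : (PySem.Set.contains vset s && !(PySem.Set.contains st.1 s)) = true
    · have hstep : pvInner vset st s = (PySem.Set.add st.1 s, true) := by
        unfold pvInner; rw [if_pos hc]
      rw [hstep]
      have hc' := (Bool.and_eq_true _ _).mp hc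
      have hlt := pvMissing_add_lt vset st.1 s hc'.1 (by simpa using hc'.2)
      rcases ih (PySem.Set.add st.1 s, true) with heq | hlt2
      · rw [heq]; exact Or.inr ⟨hlt, rfl⟩
      · exact Or.inr ⟨lt_trans hlt2.1 hlt, hlt2.2⟩
    · have hstep : pvInner vset st s = st := by
        unfold pvInner; rw [if_neg hc]
      rw [hstep]
      exact ih st

lemma pvPass_meas (vset : List String) (smap : List (String × List String)) : ∀ st : List String × Bool,
    pvPass vset smap st = st ∨
      (pvMissing vset (pvPass vset smap st).1 < pvMissing vset st.1 ∧ (pvPass vset smap st).2 = true) := by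
  unfold pvPass
  induction smap with
  | nil => intro st; exact Or.inl (by simp)
  | cons p rest ih =>
    intro st
    simp only [List.foldl_cons]
    by_cases hc : PySem.Set.contains st.1 p.1 = true
    · have hstep : pvEntry vset st p = p.2.foldl (pvInner vset) st := by
        unfold pvEntry; rw [if_pos hc]
      rw [hstep]
      rcases pvInner_meas vset p.2 st with heq | hlt
      · rw [heq]; exact ih st
      · rcases ih (p.2.foldl (pvInner vset) st) with heq2 | hlt2
        · rw [heq2]; exact Or.inr hlt
        · exact Or.inr ⟨lt_trans hlt2.1 hlt.1, hlt2.2⟩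
    · have hstep : pvEntry vset st p = st := by
        unfold pvEntry; rw [if_neg hc]
      rw [hstep]
      exact ih st

-- 'while changed' loop
def pvSat (vset : List String) (smap : List (String × List String)) (r : List String) : List String :=
  if h : (pvPass vset smap (r, false)).2 = true then pvSat vset smap (pvPass vset smap (r, false)).1
  else (pvPass vset smap (r, false)).1
termination_by pvMissing vset r
decreasing_by
  rcases pvPass_meas vset smap (r, false) with heq | hlt
  · rw [heq] at h; exact absurd h (by simp)
  · exact hlt.1

def filter_vertices_from_vertex_alt (vertices_ids : List String) (start_vertex_id : String) (successor_map : List (String × List String)) : List String :=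
  let vertices_set := PySem.Set.ofList vertices_ids
  if !(PySem.Set.contains vertices_set start_vertex_id) then []
  else PySem.List.sorted (pvSat vertices_set successor_map [start_vertex_id]) (fun x => x)

-- ===== PRECONDITION & SPEC =====
-- Pre_ excludes association lists whose successor_map has duplicate keys: they do not represent
-- a Python dict (the declared parameter type), so no Python call ever receives them.
def Pre_filter_vertices_from_vertex (vertices_ids : List String) (start_vertex_id : String) (successor_map : List (String × List String)) : Prop :=
  (successor_map.map Prod.fst).Nodup
instance (vertices_ids : List String) (start_vertex_id : String) (successor_map : List (String × List String)) : Decidable (Pre_filter_vertices_from_vertex vertices_ids start_vertex_id successor_map) := by unfold Pre_filter_vertices_from_vertex; infer_instance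

def pvWitness_filter_vertices_from_vertex : List String × String × (List (String × List String)) :=
  (["a", "b", "c"], "a", [("a", ["b"]), ("b", ["c"])])

def Spec_filter_vertices_from_vertex (vertices_ids : List String) (start_vertex_id : String) (successor_map : List (String × List String)) (out : List String) : Prop := out = filter_vertices_from_vertex_alt vertices_ids start_vertex_id successor_map
instance (vertices_ids : List String) (start_vertex_id : String) (successor_map : List (String × List String)) (out : List String) : Decidable (Spec_filter_vertices_from_vertex vertices_ids start_vertex_id successor_map out) := by unfold Spec_filter_vertices_from_vertex; infer_instance

-- ===== CLAIM =====
def Claim_equal_filter_vertices_from_vertex : Prop := ∀ (vertices_ids : List String) (start_vertex_id : String) (successor_map : List (String × List String)), Dom_filter_vertices_from_vertex vertices_ids start_vertex_id successor_map → Pre_filter_vertices_from_vertex vertices_ids start_vertex_id successor_map → Spec_filter_vertices_from_vertex vertices_ids start_vertex_id successor_map (filter_vertices_from_vertex vertices_ids start_vertex_id successor_map)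

-- ===== LEMMAS AND PROOFS =====

-- reachability from start through edges of the dict, restricted to vset
inductive pvReach (vset : List String) (smap : List (String × List String)) (start : String) : String → Prop
  | base : pvReach vset smap start start
  | step {v s : String} : pvReach vset smap start v →
      s ∈ PySem.Dict.getD (PySem.Dict.mk smap) v [] →
      PySem.Set.contains vset s = true → pvReach vset smap start s

-- ---- generic facts about the two inner folds ----

lemma pvStep_mono (vset : List String) (l : List String) : ∀ st : List String × List String,
    ∀ x ∈ st.1, x ∈ (l.foldl (pvStep vset) st).1 := by
  induction l with
  | nil => intro st x hx; simpa using hx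
  | cons s rest ih =>
    intro st x hx
    simp only [List.foldl_cons]
    apply ih
    unfold pvStep
    split
    · exact (PySem.Set.mem_add _ _ _).mpr (Or.inl hx)
    · exact hx

lemma pvStep_sub (vset : List String) (l : List String) : ∀ st : List String × List String,
    ∀ x ∈ (l.foldl (pvStep vset) st).1, x ∈ st.1 ∨ (x ∈ l ∧ PySem.Set.contains vset x = true) := by
  induction l with
  | nil => intro st x hx; exact Or.inl (by simpa using hx)
  | cons s rest ih =>
    intro st x hx
    simp only [List.foldl_cons] at hx
    rcases ih (pvStep vset st s) x hx with h1 | h2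
    · unfold pvStep at h1
      by_cases hc : (PySem.Set.contains vset s && !(PySem.Set.contains st.1 s)) = true
      · rw [if_pos hc] at h1
        rcases (PySem.Set.mem_add _ _ _).mp h1 with h1a | h1b
        · exact Or.inl h1a
        · subst h1b
          exact Or.inr ⟨by simp, ((Bool.and_eq_true _ _).mp hc).1⟩
      · rw [if_neg hc] at h1
        exact Or.inl h1
    · exact Or.inr ⟨List.mem_cons_of_mem _ h2.1, h2.2⟩

lemma pvStep_nodup (vset : List String) (l : List String) : ∀ st : List String × List String,
    st.1.Nodup → (l.foldl (pvStep vset) st).1.Nodup := by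
  induction l with
  | nil => intro st h; simpa using h
  | cons s rest ih =>
    intro st h
    simp only [List.foldl_cons]
    apply ih
    unfold pvStep
    split
    · exact PySem.Set.nodup_add _ _ h
    · exact h

lemma pvStep_queue_sub (vset : List String) (l : List String) : ∀ st : List String × List String,
    (∀ x ∈ st.2, x ∈ st.1) → ∀ x ∈ (l.foldl (pvStep vset) st).2, x ∈ (l.foldl (pvStep vset) st).1 := by
  induction l with
  | nil => intro st h; simpa using h
  | cons s rest ih =>
    intro st h
    simp only [List.foldl_cons]
    apply ih
    unfold pvStep
    split
    · intro x hx
      rcases List.mem_append.mp hx with hxa | hxb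
      · exact (PySem.Set.mem_add _ _ _).mpr (Or.inl (h x hxa))
      · exact (PySem.Set.mem_add _ _ _).mpr (Or.inr (by simpa using hxb))
    · exact h

lemma pvStep_queue_mono (vset : List String) (l : List String) : ∀ st : List String × List String,
    ∀ x ∈ st.2, x ∈ (l.foldl (pvStep vset) st).2 := by
  induction l with
  | nil => intro st x hx; simpa using hx
  | cons s rest ih =>
    intro st x hx
    simp only [List.foldl_cons]
    apply ih
    unfold pvStep
    split
    · exact List.mem_append.mpr (Or.inl hx)
    · exact hx

-- every eligible element of the folded list ends up in filtered
lemma pvStep_complete (vset : List String) (l : List String) : ∀ st : List String × List String,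
    ∀ s ∈ l, PySem.Set.contains vset s = true → s ∈ (l.foldl (pvStep vset) st).1 := by
  induction l with
  | nil => intro st s hs; simp at hs
  | cons a rest ih =>
    intro st s hs hv
    simp only [List.foldl_cons]
    rcases List.mem_cons.mp hs with h1 | h2
    · subst h1
      apply pvStep_mono
      unfold pvStep
      by_cases hc : (PySem.Set.contains vset s && !(PySem.Set.contains st.1 s)) = true
      · rw [if_pos hc]
        exact (PySem.Set.mem_add _ _ _).mpr (Or.inr rfl)
      · rw [if_neg hc]
        rw [hv] at hc
        simp only [Bool.true_and, Bool.not_eq_true', Bool.not_eq_false] at hc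
        exact (PySem.Set.contains_iff _ _).mp (by simpa using hc)
    · exact ih _ s h2 hv

-- anything new in filtered is also in the queue
lemma pvStep_new_in_queue (vset : List String) (l : List String) : ∀ st : List String × List String,
    ∀ x ∈ (l.foldl (pvStep vset) st).1, x ∈ st.1 ∨ x ∈ (l.foldl (pvStep vset) st).2 := by
  induction l with
  | nil => intro st x hx; exact Or.inl (by simpa using hx)
  | cons s rest ih =>
    intro st x hx
    simp only [List.foldl_cons] at hx ⊢
    rcases ih (pvStep vset st s) x hx with h1 | h2
    · unfold pvStep at h1
      by_cases hc : (PySem.Set.contains vset s && !(PySem.Set.contains st.1 s)) = true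
      · rw [if_pos hc] at h1
        rcases (PySem.Set.mem_add _ _ _).mp h1 with h1a | h1b
        · exact Or.inl h1a
        · subst h1b
          refine Or.inr ?_
          apply pvStep_queue_mono
          unfold pvStep
          rw [if_pos hc]
          simp
      · rw [if_neg hc] at h1
        exact Or.inl h1
    · exact Or.inr h2

-- ---- A's BFS returns exactly the reachable set ----

def pvSound (vset : List String) (smap : List (String × List String)) (start : String) (f : List String) : Prop :=
  ∀ x ∈ f, pvReach vset smap start x

def pvClosedAway (vset : List String) (smap : List (String × List String)) (f q : List String) : Prop :=
  ∀ v ∈ f, v ∉ q → ∀ s ∈ PySem.Dict.getD (PySem.Dict.mk smap) v [], PySem.Set.contains vset s = true → s ∈ f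

lemma pvBfsA_props (vset : List String) (smap : List (String × List String)) (start : String) :
    ∀ f q : List String, (∀ v ∈ q, v ∈ f) → pvSound vset smap start f → pvClosedAway vset smap f q → f.Nodup →
    (∀ x ∈ f, x ∈ pvBfsA vset smap f q) ∧ (pvBfsA vset smap f q).Nodup ∧
      pvSound vset smap start (pvBfsA vset smap f q) ∧ pvClosedAway vset smap (pvBfsA vset smap f q) [] := by
  intro f q
  induction f, q using pvBfsA.induct vset smap with
  | case1 f =>
    intro _ hsound hcl hnd
    rw [pvBfsA]
    exact ⟨fun x hx => hx, hnd, hsound, fun v hv _ => hcl v hv (by simp)⟩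
  | case2 f current rest st ih =>
    intro hq hsound hcl hnd
    rw [pvBfsA]
    have hcur : current ∈ f := hq current (by simp)
    have hq' : ∀ v ∈ st.2, v ∈ st.1 :=
      pvStep_queue_sub vset _ (f, rest) (fun x hx => hq x (List.mem_cons_of_mem _ hx))
    have hsound' : pvSound vset smap start st.1 := by
      intro x hx
      rcases pvStep_sub vset _ (f, rest) x hx with h1 | h2
      · exact hsound x h1
      · exact pvReach.step (hsound current hcur) h2.1 h2.2
    have hcl' : pvClosedAway vset smap st.1 st.2 := by
      intro v hv hnq s hs hsv
      rcases pvStep_new_in_queue vset _ (f, rest) v hv with h1 | h2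
      · by_cases hvc : v = current
        · subst hvc
          exact pvStep_complete vset _ (f, rest) s hs hsv
        · have hvr : v ∉ rest := fun hr => hnq (pvStep_queue_mono vset _ (f, rest) v hr)
          have : v ∉ current :: rest := by
            simp only [List.mem_cons]
            rintro (h | h)
            · exact hvc h
            · exact hvr h
          exact pvStep_mono vset _ (f, rest) s (hcl v h1 this s hs hsv)
      · exact absurd h2 hnq
    have hnd' : st.1.Nodup := pvStep_nodup vset _ (f, rest) hnd
    have ihr := ih hq' hsound' hcl' hnd'
    refine ⟨?_, ihr.2.1, ihr.2.2.1, ihr.2.2.2⟩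
    intro x hx
    exact ihr.1 x (pvStep_mono vset _ (f, rest) x hx)

-- ---- B's saturation returns exactly the reachable set ----

lemma pvInner_mono (vset : List String) (l : List String) : ∀ st : List String × Bool,
    ∀ x ∈ st.1, x ∈ (l.foldl (pvInner vset) st).1 := by
  induction l with
  | nil => intro st x hx; simpa using hx
  | cons s rest ih =>
    intro st x hx
    simp only [List.foldl_cons]
    apply ih
    unfold pvInner
    split
    · exact (PySem.Set.mem_add _ _ _).mpr (Or.inl hx)
    · exact hx

lemma pvPass_mono (vset : List String) (smap : List (String × List String)) (st : List String × Bool) :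
    ∀ x ∈ st.1, x ∈ (pvPass vset smap st).1 := by
  unfold pvPass
  induction smap generalizing st with
  | nil => intro x hx; simpa using hx
  | cons p rest ih =>
    intro x hx
    simp only [List.foldl_cons]
    apply ih
    unfold pvEntry
    split
    · exact pvInner_mono vset p.2 st x hx
    · exact hx

lemma pvInner_nodup (vset : List String) (l : List String) : ∀ st : List String × Bool,
    st.1.Nodup → (l.foldl (pvInner vset) st).1.Nodup := by
  induction l with
  | nil => intro st h; simpa using h
  | cons s rest ih =>
    intro st h
    simp only [List.foldl_cons]
    apply ih
    unfold pvInner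
    split
    · exact PySem.Set.nodup_add _ _ h
    · exact h

lemma pvPass_nodup (vset : List String) (smap : List (String × List String)) (st : List String × Bool)
    (h : st.1.Nodup) : (pvPass vset smap st).1.Nodup := by
  unfold pvPass
  induction smap generalizing st with
  | nil => simpa using h
  | cons p rest ih =>
    simp only [List.foldl_cons]
    apply ih
    unfold pvEntry
    split
    · exact pvInner_nodup vset p.2 st h
    · exact h

lemma pvInner_sound (vset : List String) (smap : List (String × List String)) (start : String)
    (l : List String) (hl : ∀ s ∈ l, PySem.Set.contains vset s = true → pvReach vset smap start s) :
    ∀ st : List String × Bool, pvSound vset smap start st.1 → pvSound vset smap start (l.foldl (pvInner vset) st).1 := by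
  revert hl
  induction l with
  | nil => intro _ st h; simpa using h
  | cons s rest ih =>
    intro hl st h
    simp only [List.foldl_cons]
    apply ih (fun a ha hv => hl a (List.mem_cons_of_mem _ ha) hv)
    intro x hx
    unfold pvInner at hx
    by_cases hc : (PySem.Set.contains vset s && !(PySem.Set.contains st.1 s)) = true
    · rw [if_pos hc] at hx
      rcases (PySem.Set.mem_add _ _ _).mp hx with h1 | h2
      · exact h x h1
      · subst h2
        exact hl x (by simp) ((Bool.and_eq_true _ _).mp hc).1
    · rw [if_neg hc] at hx
      exact h x hx

-- sweep over any sublist of smap's entries preserves soundness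
lemma pvEntryFold_sound (vset : List String) (smap : List (String × List String)) (start : String)
    (hkeys : (smap.map Prod.fst).Nodup) (l : List (String × List String)) (hl : ∀ p ∈ l, p ∈ smap) :
    ∀ st : List String × Bool, pvSound vset smap start st.1 → pvSound vset smap start (l.foldl (pvEntry vset) st).1 := by
  revert hl
  induction l with
  | nil => intro _ st h; simpa using h
  | cons p rest ih =>
    intro hl st h
    simp only [List.foldl_cons]
    apply ih (fun a ha => hl a (List.mem_cons_of_mem _ ha))
    unfold pvEntry
    by_cases hc : PySem.Set.contains st.1 p.1 = true
    · rw [if_pos hc]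
      have hp : p ∈ smap := hl p (by simp)
      have hget : PySem.Dict.getD (PySem.Dict.mk smap) p.1 [] = p.2 := by
        apply PySem.Dict.getD_of_mem_items (PySem.Dict.mk smap) (k := p.1) (v := p.2)
        · exact hp
        · simpa [PySem.Dict.keys, PySem.Dict.items] using hkeys
      have hsrc : pvReach vset smap start p.1 := h p.1 ((PySem.Set.contains_iff _ _).mp hc)
      apply pvInner_sound vset smap start p.2 ?_ st h
      intro a ha hv
      exact pvReach.step hsrc (hget ▸ ha) hv
    · rw [if_neg hc]
      exact h

lemma pvPass_sound (vset : List String) (smap : List (String × List String)) (start : String)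
    (hkeys : (smap.map Prod.fst).Nodup) :
    ∀ st : List String × Bool, pvSound vset smap start st.1 → pvSound vset smap start (pvPass vset smap st).1 := by
  intro st h
  exact pvEntryFold_sound vset smap start hkeys smap (fun _ hp => hp) st h

-- filtered only grows by appending
lemma pvInner_append (vset : List String) (l : List String) : ∀ st : List String × Bool,
    ∃ e, (l.foldl (pvInner vset) st).1 = st.1 ++ e := by
  induction l with
  | nil => intro st; exact ⟨[], by simp⟩
  | cons s rest ih =>
    intro st
    simp only [List.foldl_cons]
    obtain ⟨e, he⟩ := ih (pvInner vset st s)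
    unfold pvInner at he ⊢
    by_cases hc : (PySem.Set.contains vset s && !(PySem.Set.contains st.1 s)) = true
    · rw [if_pos hc] at he ⊢
      have hadd : PySem.Set.add st.1 s = st.1 ++ [s] := by
        have hcf : PySem.Set.contains st.1 s = false := by
          have := ((Bool.and_eq_true _ _).mp hc).2
          simpa using this
        unfold PySem.Set.add
        rw [hcf]
        simp
      exact ⟨s :: e, by rw [he]; simp [hadd]⟩
    · rw [if_neg hc] at he ⊢
      exact ⟨e, he⟩

lemma pvEntry_append (vset : List String) (st : List String × Bool) (p : String × List String) :
    ∃ e, (pvEntry vset st p).1 = st.1 ++ e := by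
  unfold pvEntry
  split
  · exact pvInner_append vset p.2 st
  · exact ⟨[], by simp⟩

lemma pvPass_append (vset : List String) (smap : List (String × List String)) (st : List String × Bool) :
    ∃ e, (pvPass vset smap st).1 = st.1 ++ e := by
  unfold pvPass
  induction smap generalizing st with
  | nil => exact ⟨[], by simp⟩
  | cons p rest ih =>
    simp only [List.foldl_cons]
    obtain ⟨e1, he1⟩ := pvEntry_append vset st p
    obtain ⟨e2, he2⟩ := ih (pvEntry vset st p)
    exact ⟨e1 ++ e2, by rw [he2, he1]; simp⟩

-- a fixed point of the inner fold already contains every eligible element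
lemma pvInner_fix (vset : List String) (l : List String) : ∀ st : List String × Bool,
    (l.foldl (pvInner vset) st).1 = st.1 → ∀ s ∈ l, PySem.Set.contains vset s = true → s ∈ st.1 := by
  induction l with
  | nil => intro st _ s hs; simp at hs
  | cons a rest ih =>
    intro st hfix s hs hv
    simp only [List.foldl_cons] at hfix
    by_cases hc : (PySem.Set.contains vset a && !(PySem.Set.contains st.1 a)) = true
    · exfalso
      have hstep : pvInner vset st a = (PySem.Set.add st.1 a, true) := by
        unfold pvInner; rw [if_pos hc]
      have hadd : PySem.Set.add st.1 a = st.1 ++ [a] := by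
        have hcf : PySem.Set.contains st.1 a = false := by
          have := ((Bool.and_eq_true _ _).mp hc).2
          simpa using this
        unfold PySem.Set.add
        rw [hcf]
        simp
      obtain ⟨e, he⟩ := pvInner_append vset rest (pvInner vset st a)
      rw [hstep] at he
      rw [hstep, he] at hfix
      have := congrArg List.length hfix
      simp [hadd] at this
    · have hstep : pvInner vset st a = st := by
        unfold pvInner; rw [if_neg hc]
      rw [hstep] at hfix
      rcases List.mem_cons.mp hs with h1 | h2
      · subst h1
        rw [hv] at hc
        simp only [Bool.true_and, Bool.not_eq_true', Bool.not_eq_false] at hc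
        exact (PySem.Set.contains_iff _ _).mp (by simpa using hc)
      · exact ih st hfix s h2 hv

-- a fixed point of a full sweep is closed under every edge whose source it contains
lemma pvPass_fix (vset : List String) (smap : List (String × List String)) : ∀ st : List String × Bool,
    (pvPass vset smap st).1 = st.1 →
    ∀ p ∈ smap, p.1 ∈ st.1 → ∀ s ∈ p.2, PySem.Set.contains vset s = true → s ∈ st.1 := by
  unfold pvPass
  induction smap with
  | nil => intro st _ p hp; simp at hp
  | cons a rest ih =>
    intro st hfix p hp hsrc s hs hv
    simp only [List.foldl_cons] at hfix
    obtain ⟨e1, he1⟩ := pvEntry_append vset st a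
    obtain ⟨e2, he2⟩ := pvPass_append vset rest (pvEntry vset st a)
    unfold pvPass at he2
    rw [he2, he1] at hfix
    have hlen := congrArg List.length hfix
    simp only [List.length_append] at hlen
    have he1nil : e1 = [] := List.eq_nil_of_length_eq_zero (by omega)
    have he2nil : e2 = [] := List.eq_nil_of_length_eq_zero (by omega)
    have hentry : (pvEntry vset st a).1 = st.1 := by rw [he1, he1nil]; simp
    have hrestfix : (rest.foldl (pvEntry vset) (pvEntry vset st a)).1 = (pvEntry vset st a).1 := by
      rw [he2, he2nil]; simp
    rcases List.mem_cons.mp hp with h1 | h2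
    · subst h1
      have hc : PySem.Set.contains st.1 p.1 = true := (PySem.Set.contains_iff _ _).mpr hsrc
      have hinner : (p.2.foldl (pvInner vset) st).1 = st.1 := by
        have : pvEntry vset st p = p.2.foldl (pvInner vset) st := by
          unfold pvEntry; rw [if_pos hc]
        rw [← this]; exact hentry
      exact pvInner_fix vset p.2 st hinner s hs hv
    · have := ih (pvEntry vset st a) hrestfix p h2 (hentry ▸ hsrc) s hs hv
      rw [hentry] at this
      exact this

def pvClosed (vset : List String) (smap : List (String × List String)) (f : List String) : Prop :=
  ∀ v ∈ f, ∀ s ∈ PySem.Dict.getD (PySem.Dict.mk smap) v [], PySem.Set.contains vset s = true → s ∈ f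

lemma pvSat_props (vset : List String) (smap : List (String × List String)) (start : String)
    (hkeys : (smap.map Prod.fst).Nodup) :
    ∀ r : List String, pvSound vset smap start r → r.Nodup →
    (∀ x ∈ r, x ∈ pvSat vset smap r) ∧ (pvSat vset smap r).Nodup ∧
      pvSound vset smap start (pvSat vset smap r) ∧ pvClosed vset smap (pvSat vset smap r) := by
  intro r
  induction r using pvSat.induct vset smap with
  | case1 r h ih =>
    intro hsound hnd
    rw [pvSat, dif_pos h]
    have hsound' : pvSound vset smap start (pvPass vset smap (r, false)).1 :=
      pvPass_sound vset smap start hkeys (r, false) hsound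
    have hnd' : (pvPass vset smap (r, false)).1.Nodup := pvPass_nodup vset smap (r, false) hnd
    have ihr := ih hsound' hnd'
    refine ⟨?_, ihr.2.1, ihr.2.2.1, ihr.2.2.2⟩
    intro x hx
    exact ihr.1 x (pvPass_mono vset smap (r, false) x hx)
  | case2 r h =>
    intro hsound hnd
    rw [pvSat, dif_neg h]
    have heq : pvPass vset smap (r, false) = (r, false) := by
      rcases pvPass_meas vset smap (r, false) with heq | hlt
      · exact heq
      · exact absurd hlt.2 h
    have h1 : (pvPass vset smap (r, false)).1 = r := by rw [heq]
    rw [h1]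
    refine ⟨fun x hx => hx, hnd, hsound, ?_⟩
    intro v hv s hs hsv
    cases hget : (PySem.Dict.mk smap).get? v with
    | none =>
      rw [PySem.Dict.getD_of_get?_eq_none _ _ hget] at hs
      simp at hs
    | some val =>
      have hval : PySem.Dict.getD (PySem.Dict.mk smap) v [] = val :=
        PySem.Dict.getD_of_get?_eq_some _ _ hget
      have hmem : (v, val) ∈ smap := PySem.Dict.mem_items_of_get?_eq_some _ hget
      have := pvPass_fix vset smap (r, false) (by rw [heq]) (v, val) hmem hv s (hval ▸ hs) hsv
      exact this

-- a closed set containing start contains everything reachable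
lemma pvReach_sub (vset : List String) (smap : List (String × List String)) (start : String)
    (f : List String) (hstart : start ∈ f) (hcl : pvClosed vset smap f) :
    ∀ x, pvReach vset smap start x → x ∈ f := by
  intro x hx
  induction hx with
  | base => exact hstart
  | step _ hs hv ih => exact hcl _ ih _ hs hv

-- ===== VERDICT =====
theorem filter_vertices_from_vertex_spec : Claim_equal_filter_vertices_from_vertex := by
  intro vertices_ids start_vertex_id successor_map _ hpre
  unfold Spec_filter_vertices_from_vertex filter_vertices_from_vertex filter_vertices_from_vertex_alt
  by_cases h : (PySem.Set.contains (PySem.Set.ofList vertices_ids) start_vertex_id) = true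
  · simp only [h, Bool.not_true, Bool.false_eq_true, if_false]
    have hA := pvBfsA_props (PySem.Set.ofList vertices_ids) successor_map start_vertex_id
      [start_vertex_id] [start_vertex_id]
      (by intro v hv; exact hv)
      (by intro x hx; simp at hx; subst hx; exact pvReach.base)
      (by intro v hv hnq; simp at hv; simp [hv] at hnq)
      (by simp)
    have hB := pvSat_props (PySem.Set.ofList vertices_ids) successor_map start_vertex_id hpre
      [start_vertex_id]
      (by intro x hx; simp at hx; subst hx; exact pvReach.base)
      (by simp)
    apply PySem.List.sorted_eq_sorted_of_perm _ _ _ (fun _ _ hxy => hxy)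
    rw [List.perm_ext_iff_of_nodup hA.2.1 hB.2.1]
    intro a
    constructor
    · intro ha
      exact pvReach_sub _ _ _ _ (hB.1 _ (by simp)) hB.2.2.2 a (hA.2.2.1 a ha)
    · intro ha
      have hcl : pvClosedAway (PySem.Set.ofList vertices_ids) successor_map
          (pvBfsA (PySem.Set.ofList vertices_ids) successor_map [start_vertex_id] [start_vertex_id]) [] := hA.2.2.2
      have : ∀ x, pvReach (PySem.Set.ofList vertices_ids) successor_map start_vertex_id x →
          x ∈ pvBfsA (PySem.Set.ofList vertices_ids) successor_map [start_vertex_id] [start_vertex_id] := by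
        apply pvReach_sub
        · exact hA.1 _ (by simp)
        · intro v hv s hs hsv; exact hcl v hv (by simp) s hs hsv
      exact this a (hB.2.2.1 a ha)
  · rw [Bool.not_eq_true] at h
    have h' : start_vertex_id ∉ vertices_ids := by
      simpa [PySem.Set.contains, PySem.Set.mem_ofList] using h
    simp [h']
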